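-- pv_equiv track=rewrite | github.com/masumahmedeesha/Security-and-Crypto | Answers/Lab Manual - 2/Vignere-Crypto.py | findCharacters
-- ===== SOURCE A (Python) =====
-- def splitIntoCharacters(word):
--     return [i for i in word]
--
-- def findCharacters(string):
--     allCharacters = []
--     punctuations = [",", ".", ";", "!", "?", "-", "'", "(", ")","=","+"]
--     for i in string.split():
--         for j in splitIntoCharacters(i):
--             if j not in punctuations:
--                 allCharacters.append(j)
--     return allCharacters
-- ===== SOURCE B (Python) =====
-- def findCharacters(string):
--     punctuations = (",", ".", ";", "!", "?", "-", "'", "(", ")", "=", "+")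
--     return [c for c in string if not c.isspace() and c not in punctuations]
-- ===== Notes on version B (the rewrite author's own statement) =====
-- stated objective: simpler
-- what changed: Replaces split()-into-words plus a nested per-word character loop (with the splitIntoCharacters helper) by a single pass over the raw string that keeps each character that is neither whitespace nor punctuation.
import Mathlib
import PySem

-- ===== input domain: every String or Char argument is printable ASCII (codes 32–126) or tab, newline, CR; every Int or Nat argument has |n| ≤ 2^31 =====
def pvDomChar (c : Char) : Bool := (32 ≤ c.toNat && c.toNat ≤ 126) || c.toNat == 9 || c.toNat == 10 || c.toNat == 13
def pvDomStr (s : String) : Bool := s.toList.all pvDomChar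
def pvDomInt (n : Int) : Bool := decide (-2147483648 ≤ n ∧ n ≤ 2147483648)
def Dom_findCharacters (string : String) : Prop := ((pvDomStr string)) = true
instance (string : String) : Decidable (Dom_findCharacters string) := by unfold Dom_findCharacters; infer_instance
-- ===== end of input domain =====

-- B replaces A's split()-into-words + nested per-word loop by one pass over the raw
-- string filtering out whitespace and punctuation (objective: simpler).

-- ===== PORT A =====
def splitIntoCharacters (word : String) : List String :=
  word.toList.map (fun c => String.ofList [c])

def findCharacters (string : String) : List String :=
  let punctuations : List String := [",", ".", ";", "!", "?", "-", "'", "(", ")", "=", "+"]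
  (PySem.Str.split₀ string).foldl
    (fun allCharacters i =>
      (splitIntoCharacters i).foldl
        (fun allCharacters j =>
          if j ∉ punctuations then allCharacters ++ [j] else allCharacters)
        allCharacters)
    []

-- ===== PORT B =====
def findCharacters_alt (string : String) : List String :=
  let punctuations : List String := [",", ".", ";", "!", "?", "-", "'", "(", ")", "=", "+"]
  (string.toList.map (fun c => String.ofList [c])).filter
    (fun c => !PySem.Str.strIsspace c && decide (c ∉ punctuations))

-- ===== PRECONDITION & SPEC =====
def Spec_findCharacters (string : String) (out : List String) : Prop := out = findCharacters_alt string
instance (string : String) (out : List String) : Decidable (Spec_findCharacters string out) := by unfold Spec_findCharacters; infer_instance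

-- ===== CLAIM (what is proved, stated in full; the proofs are below) =====
def Claim_equal_findCharacters : Prop := ∀ (string : String), Dom_findCharacters string → Spec_findCharacters string (findCharacters string)

-- ===== LEMMAS AND PROOFS =====

-- the fixed punctuation lists of the two ports (definitionally the ports' literals)
def pvP : List String := [",", ".", ";", "!", "?", "-", "'", "(", ")", "=", "+"]
def pvQ : List Char := [',', '.', ';', '!', '?', '-', '\'', '(', ')', '=', '+']

lemma ofList_inj (a b : List Char) : String.ofList a = String.ofList b ↔ a = b := by
  constructor
  · intro h
    have := congrArg String.toList h
    simpa using this
  · rintro rfl; rfl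

lemma mem_pvP (c : Char) : (String.ofList [c] ∈ pvP) ↔ c ∈ pvQ := by
  have h1 : ("," : String) = String.ofList [','] := rfl
  have h2 : ("." : String) = String.ofList ['.'] := rfl
  have h3 : (";" : String) = String.ofList [';'] := rfl
  have h4 : ("!" : String) = String.ofList ['!'] := rfl
  have h5 : ("?" : String) = String.ofList ['?'] := rfl
  have h6 : ("-" : String) = String.ofList ['-'] := rfl
  have h7 : ("'" : String) = String.ofList ['\''] := rfl
  have h8 : ("(" : String) = String.ofList ['('] := rfl
  have h9 : (")" : String) = String.ofList [')'] := rfl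
  have h10 : ("=" : String) = String.ofList ['='] := rfl
  have h11 : ("+" : String) = String.ofList ['+'] := rfl
  simp only [pvP, pvQ, List.mem_cons, List.not_mem_nil, or_false,
    h1, h2, h3, h4, h5, h6, h7, h8, h9, h10, h11, ofList_inj, List.cons.injEq, and_true]

-- flattening the words of split₀ = dropping exactly the whitespace characters
lemma go_flatten (cs : List Char) : ∀ (cur : List Char) (accs : List (List Char)),
    (PySem.Chars.split₀.go cs cur accs).flatten
      = accs.reverse.flatten ++ cur.reverse ++ cs.filter (fun c => !PySem.Chars.isspace c) := by
  induction cs with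
  | nil =>
      intro cur accs
      simp only [PySem.Chars.split₀.go]
      by_cases h : cur = []
      · simp [h]
      · have hne : cur.isEmpty = false := by simpa using h
        simp [hne]
  | cons c rest ih =>
      intro cur accs
      simp only [PySem.Chars.split₀.go]
      by_cases hsp : PySem.Chars.isspace c
      · by_cases hc : cur = []
        · simp [hsp, hc, ih]
        · have hne : cur.isEmpty = false := by simpa using hc
          simp [hsp, hne, ih, List.append_assoc]
      · simp [hsp, ih, List.append_assoc]

lemma split₀_flatten (cs : List Char) :
    (PySem.Chars.split₀ cs).flatten = cs.filter (fun c => !PySem.Chars.isspace c) := by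
  simpa [PySem.Chars.split₀] using go_flatten cs [] []

-- A's inner character loop, from an arbitrary accumulator
lemma inner_eq (l acc : List String) :
    l.foldl (fun a j => if j ∉ pvP then a ++ [j] else a) acc
      = acc ++ l.filter (fun j => decide (j ∉ pvP)) := by
  induction l generalizing acc with
  | nil => simp
  | cons h t ih =>
      by_cases hm : h ∈ pvP
      · rw [List.foldl_cons, if_neg (not_not_intro hm), ih, List.filter_cons]
        simp [hm]
      · rw [List.foldl_cons, if_pos hm, ih, List.filter_cons]
        simp [hm, List.append_assoc]

-- A's outer word loop, from an arbitrary accumulator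
lemma outer_eq (ws : List String) (acc : List String) :
    ws.foldl
      (fun a i => (splitIntoCharacters i).foldl
        (fun a j => if j ∉ pvP then a ++ [j] else a) a) acc
      = acc ++ ws.flatMap (fun i => (splitIntoCharacters i).filter (fun j => decide (j ∉ pvP))) := by
  induction ws generalizing acc with
  | nil => simp
  | cons w t ih => rw [List.foldl_cons, inner_eq, ih, List.flatMap_cons, List.append_assoc]

lemma flatMap_filter {α : Type} (p : α → Bool) (l : List (List α)) :
    l.flatMap (fun w => w.filter p) = l.flatten.filter p := by
  induction l with
  | nil => simp
  | cons w t ih => simp [ih]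

-- ===== VERDICT (by name: the statement is the Claim_ definition above) =====
theorem findCharacters_spec : Claim_equal_findCharacters := by
  intro s _
  show findCharacters s = findCharacters_alt s
  have hA : findCharacters s
      = (PySem.Str.split₀ s).foldl
          (fun a i => (splitIntoCharacters i).foldl
            (fun a j => if j ∉ pvP then a ++ [j] else a) a) [] := rfl
  have hB : findCharacters_alt s
      = (s.toList.map (fun c => String.ofList [c])).filter
          (fun c => !PySem.Str.strIsspace c && decide (c ∉ pvP)) := rfl
  rw [hA, hB, outer_eq, List.nil_append]
  have hword : ∀ w : List Char,
      ((splitIntoCharacters (String.ofList w)).filter (fun j => decide (j ∉ pvP)))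
        = ((w.filter (fun c => decide (c ∉ pvQ))).map (fun c => String.ofList [c])) := by
    intro w
    rw [splitIntoCharacters]
    have : (String.ofList w).toList = w := by simp
    rw [this, List.filter_map]
    congr 1
    apply List.filter_congr
    intro c _
    simp [Function.comp, mem_pvP]
  calc (PySem.Str.split₀ s).flatMap
          (fun i => (splitIntoCharacters i).filter (fun j => decide (j ∉ pvP)))
      = (PySem.Chars.split₀ s.toList).flatMap
          (fun w => (w.filter (fun c => decide (c ∉ pvQ))).map (fun c => String.ofList [c])) := by
        rw [PySem.Str.split₀, List.flatMap_map]
        simp only [hword]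
    _ = ((PySem.Chars.split₀ s.toList).flatMap
          (fun w => w.filter (fun c => decide (c ∉ pvQ)))).map (fun c => String.ofList [c]) := by
        rw [List.map_flatMap]
    _ = ((s.toList.filter (fun c => !PySem.Chars.isspace c)).filter
          (fun c => decide (c ∉ pvQ))).map (fun c => String.ofList [c]) := by
        rw [flatMap_filter, split₀_flatten]
    _ = (s.toList.map (fun c => String.ofList [c])).filter
          (fun c => !PySem.Str.strIsspace c && decide (c ∉ pvP)) := by
        rw [List.filter_filter, List.filter_map]
        congr 1
        apply List.filter_congr
        intro c _
        simp [Function.comp, mem_pvP, Bool.and_comm, PySem.Chars.strIsspace]
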